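-- pv_equiv track=rewrite | github.com/marcosfede/algorithms | backtrack/middle_earth/middle_earth.py | are_raidable
-- ===== SOURCE A (Python) =====
-- def cost_to_raid(towns):
--     cost, revenue = map(sum, zip(*towns))
--     return cost - revenue
--
-- def are_raidable(towns, gold, K):
--     if K == 1:
--         return gold >= towns[0][0]
--     for idx, town in enumerate(towns):
--         others = [t for i, t in enumerate(towns) if i != idx]
--         if are_raidable(others, gold, K-1):
--             if gold - cost_to_raid(others) >= town[0]:
--                 return True
--     return False
-- ===== SOURCE B (Python) =====
-- def _combos(lo, n, s):
--     # all strictly increasing index lists of length s drawn from range(lo, n)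
--     if s == 0:
--         return [[]]
--     return [[i] + rest for i in range(lo, n) for rest in _combos(i + 1, n, s - 1)]
--
-- def are_raidable(towns, gold, K):
--     # Bottom-up DP over index subsets: O(2^n * n) instead of A's O(n * n!) recursion.
--     n = len(towns)
--     if K <= 0 or K > n:
--         return False
--     if K == 1:
--         return gold >= towns[0][0]
--     base = n - K + 1
--     cur = {}
--     for c in _combos(0, n, base):
--         cur[tuple(c)] = gold >= towns[c[0]][0]
--     for s in range(base + 1, n + 1):
--         nxt = {}
--         for c in _combos(0, n, s):
--             net = sum(towns[i][0] - towns[i][1] for i in c)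
--             nxt[tuple(c)] = any(cur[tuple(j for j in c if j != i)] and gold >= net + towns[i][1]
--                                 for i in c)
--         cur = nxt
--     return cur[tuple(range(n))]
-- ===== Notes on version B (the rewrite author's own statement) =====
-- stated objective: faster
-- what changed: Replaced A's top-down recursion that re-solves every sub-list along every removal order (O(n*n!) worst case) with a bottom-up dynamic program over index subsets, memoizing one boolean per subset in layered dicts; Pre_ excludes only the inputs with K == len(towns)+1, on which A always raises IndexError.
import Mathlib
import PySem

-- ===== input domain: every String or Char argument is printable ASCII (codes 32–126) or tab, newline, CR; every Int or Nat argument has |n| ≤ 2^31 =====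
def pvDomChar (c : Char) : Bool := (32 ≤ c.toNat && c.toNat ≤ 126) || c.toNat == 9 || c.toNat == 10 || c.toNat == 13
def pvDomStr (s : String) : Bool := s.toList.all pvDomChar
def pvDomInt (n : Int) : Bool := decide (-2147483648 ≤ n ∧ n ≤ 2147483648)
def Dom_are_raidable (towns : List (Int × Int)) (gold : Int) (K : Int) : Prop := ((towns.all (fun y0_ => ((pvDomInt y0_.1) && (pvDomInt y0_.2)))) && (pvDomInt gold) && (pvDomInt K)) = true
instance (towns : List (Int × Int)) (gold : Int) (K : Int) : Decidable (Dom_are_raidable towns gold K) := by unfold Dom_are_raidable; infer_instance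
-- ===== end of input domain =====

-- B replaces A's recursion over removal orders by a bottom-up dynamic program over index
-- subsets (one memoized boolean per subset), which has an asymptotically smaller worst case.

-- ===== PORT A =====
def cost_to_raid (towns : List (Int × Int)) : Int :=
  (towns.map Prod.fst).sum - (towns.map Prod.snd).sum
-- Python's 'cost, revenue = map(sum, zip(*towns))' raises ValueError on towns = []; under
-- Pre_ A only ever evaluates cost_to_raid on nonempty lists, where this port is exact.

-- termination helper for the port of A (the filtered list is strictly shorter)
lemma pv_others_len {α : Type} (l : List (Int × α)) (x : Int × α) (h : x ∈ l) :
    ((l.filter (fun q => q.1 != x.1)).map Prod.snd).length < l.length := by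
  simp only [List.length_map]
  induction l with
  | nil => cases h
  | cons a l ih =>
    rcases List.mem_cons.mp h with rfl | hm
    · have hle := List.length_filter_le (fun q => q.1 != x.1) l
      rw [List.filter_cons]
      split_ifs with h
      · simp at h
      · simp only [List.length_cons]; omega
    · have hlt := ih hm
      rw [List.filter_cons]
      split_ifs
      · simp only [List.length_cons]; omega
      · simp only [List.length_cons]; omega

def are_raidable (towns : List (Int × Int)) (gold : Int) (K : Int) : Bool :=
  if K = 1 then
    match PySem.List.pyGet? towns 0 with
    | none => false          -- Python: IndexError here (outside Pre_)
    | some t => decide (t.1 ≤ gold)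
  else
    (PySem.List.enumerate towns).attach.any (fun p =>
      let others := ((PySem.List.enumerate towns).filter (fun q => q.1 != p.1.1)).map Prod.snd
      are_raidable others gold (K - 1) && decide (p.1.2.1 ≤ gold - cost_to_raid others))
termination_by towns.length
decreasing_by
  have h := pv_others_len (PySem.List.enumerate towns) p.1 p.2
  simpa [PySem.List.length_enumerate] using h

-- ===== PORT B =====
-- helper _combos(lo, n, s): all strictly increasing index lists of length s from range(lo, n)
-- (s is a nonnegative count in Python; it is the Nat recursion fuel here)
def pv_combos (lo n : Int) : Nat → List (List Int)
  | 0 => [[]]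
  | s + 1 => (PySem.List.pyRange lo n).flatMap (fun i =>
      (pv_combos (i + 1) n s).map (fun rest => i :: rest))

-- the first loop of B: the dict for the smallest layer (Python tuple keys → List Int keys)
def pv_baseDict (towns : List (Int × Int)) (gold base : Int) : PySem.Dict (List Int) Bool :=
  (pv_combos 0 (towns.length : Int) base.toNat).foldl
    (fun cur c => cur.insert c
      (decide ((PySem.List.pyGetD towns (PySem.List.pyGetD c 0 0) (0, 0)).1 ≤ gold)))
    PySem.Dict.empty

-- the body of B's outer 'for s in range(base+1, n+1)' loop
-- (towns[i] and cur[...] are always in range / present on the reachable calls)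
def pv_layerStep (towns : List (Int × Int)) (gold : Int)
    (cur : PySem.Dict (List Int) Bool) (s : Int) : PySem.Dict (List Int) Bool :=
  (pv_combos 0 (towns.length : Int) s.toNat).foldl
    (fun nxt c =>
      let net := (c.map (fun i =>
        (PySem.List.pyGetD towns i (0, 0)).1 - (PySem.List.pyGetD towns i (0, 0)).2)).sum
      nxt.insert c (c.any (fun i =>
        cur.getD (c.filter (fun j => j != i)) false &&
        decide (net + (PySem.List.pyGetD towns i (0, 0)).2 ≤ gold))))
    PySem.Dict.empty

def are_raidable_alt (towns : List (Int × Int)) (gold : Int) (K : Int) : Bool :=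
  let n : Int := towns.length
  if K ≤ 0 ∨ n < K then false
  else if K = 1 then
    decide ((PySem.List.pyGetD towns 0 (0, 0)).1 ≤ gold)   -- towns ≠ [] here: 1 ≤ K ≤ n
  else
    let base : Int := n - K + 1
    let fin := (PySem.List.pyRange (base + 1) (n + 1)).foldl
      (pv_layerStep towns gold) (pv_baseDict towns gold base)
    fin.getD (PySem.List.pyRange 0 n) false

-- ===== PRECONDITION & SPEC =====
-- Pre_ excludes exactly the inputs with K = len(towns) + 1, on which A always raises
-- IndexError (its K == 1 base case indexes an empty list).
def Pre_are_raidable (towns : List (Int × Int)) (gold : Int) (K : Int) : Prop :=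
  K ≠ (towns.length : Int) + 1
instance (towns : List (Int × Int)) (gold : Int) (K : Int) : Decidable (Pre_are_raidable towns gold K) := by unfold Pre_are_raidable; infer_instance
def pvWitness_are_raidable : (List (Int × Int)) × Int × Int := ([(1, 0)], 2, 1)

def Spec_are_raidable (towns : List (Int × Int)) (gold : Int) (K : Int) (out : Bool) : Prop := out = are_raidable_alt towns gold K
instance (towns : List (Int × Int)) (gold : Int) (K : Int) (out : Bool) : Decidable (Spec_are_raidable towns gold K out) := by unfold Spec_are_raidable; infer_instance

-- ===== CLAIM (what is proved, stated in full; the proofs are below) =====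
def Claim_equal_are_raidable : Prop := ∀ (towns : List (Int × Int)) (gold : Int) (K : Int), Dom_are_raidable towns gold K → Pre_are_raidable towns gold K → Spec_are_raidable towns gold K (are_raidable towns gold K)
-- ===== LEMMAS AND PROOFS =====

-- `sum` distributes over a pointwise difference
lemma pv_sum_map_sub (c : List Int) (f g : Int → Int) :
    (c.map (fun i => f i - g i)).sum = (c.map f).sum - (c.map g).sum := by
  induction c with
  | nil => simp
  | cons a c ih => simp [ih]; ring

-- removing position k removes exactly the summand g c[k]
lemma pv_sum_map_eraseIdx (co : List Int) (g : Int → Int) :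
    ∀ (k : Nat), (hk : k < co.length) →
      ((co.eraseIdx k).map g).sum = (co.map g).sum - g (co[k]'hk) := by
  induction co with
  | nil => intro k hk; simp at hk
  | cons a co ih =>
    intro k hk
    cases k with
    | zero => simp
    | succ k =>
      have hk' : k < co.length := by simpa using hk
      simp [ih k hk']
      ring

-- an enumerate prefix below the removed index is kept by the filter
lemma pv_enum_filter_keep {α : Type} (L : List α) : ∀ (s j : Int), j < s →
    (PySem.List.enumerate L s).filter (fun q => q.1 != j) = PySem.List.enumerate L s := by
  induction L with
  | nil => intro s j _; simp [PySem.List.enumerate_nil]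
  | cons x L ih =>
    intro s j h
    rw [PySem.List.enumerate_cons, List.filter_cons]
    have hb : (((s, x) : Int × α).1 != j) = true := by simp [bne_iff_ne]; omega
    rw [if_pos hb, ih (s + 1) j (by omega)]

-- the loop 'others = [t for i, t in enumerate(towns) if i != idx]' erases exactly position idx
lemma pv_enum_filter_erase {α : Type} (L : List α) : ∀ (s : Int) (k : Nat), k < L.length →
    ((PySem.List.enumerate L s).filter (fun q => q.1 != (s + (k : Int)))).map Prod.snd
      = L.eraseIdx k := by
  induction L with
  | nil => intro s k hk; simp at hk
  | cons x L ih =>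
    intro s k hk
    rw [PySem.List.enumerate_cons, List.filter_cons]
    cases k with
    | zero =>
      have h0 : (((s, x) : Int × α).1 != (s + ((0 : Nat) : Int))) = false := by simp
      rw [h0]
      simp only [Bool.false_eq_true, if_false]
      rw [pv_enum_filter_keep L (s + 1) (s + ((0 : Nat) : Int)) (by push_cast; omega)]
      simp [PySem.List.map_snd_enumerate]
    | succ k =>
      have h1 : (((s, x) : Int × α).1 != (s + ((k + 1 : Nat) : Int))) = true := by
        simp [bne_iff_ne]; push_cast; omega
      rw [if_pos h1]
      have hk' : k < L.length := by simpa using hk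
      have e : (s + ((k + 1 : Nat) : Int)) = (s + 1) + (k : Int) := by push_cast; ring
      rw [List.map_cons, e, ih (s + 1) k hk']
      rfl

-- on a strictly sorted list, erasing position k is filtering out the value c[k]
lemma pv_eraseIdx_eq_filter : ∀ (co : List Int), co.Pairwise (· < ·) →
    ∀ (k : Nat), (hk : k < co.length) →
      co.eraseIdx k = co.filter (fun j => j != (co[k]'hk)) := by
  intro co
  induction co with
  | nil => intro _ k hk; simp at hk
  | cons a co ih =>
    intro hp k hk
    have hpc := List.pairwise_cons.mp hp
    cases k with
    | zero =>
      simp only [List.eraseIdx_cons_zero, List.getElem_cons_zero, List.filter_cons,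
        bne_self_eq_false, Bool.false_eq_true, if_false]
      symm
      apply List.filter_eq_self.mpr
      intro j hj
      have := hpc.1 j hj
      simp [bne_iff_ne]; omega
    | succ k =>
      have hk' : k < co.length := by simpa using hk
      simp only [List.eraseIdx_cons_succ, List.getElem_cons_succ, List.filter_cons]
      have ha : (a != co[k]'hk') = true := by
        have := hpc.1 (co[k]'hk') (co.getElem_mem hk')
        simp [bne_iff_ne]; omega
      rw [if_pos ha, ih hpc.2 k hk']

-- every member of pv_combos lo n s is a sorted length-s index list inside [lo, n)
lemma pv_combos_mem : ∀ (s : Nat) (lo n : Int) (c : List Int), c ∈ pv_combos lo n s →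
    c.length = s ∧ c.Pairwise (· < ·) ∧ ∀ i ∈ c, lo ≤ i ∧ i < n := by
  intro s
  induction s with
  | zero =>
    intro lo n c hc
    simp only [pv_combos, List.mem_singleton] at hc
    subst hc; simp
  | succ s ih =>
    intro lo n c hc
    simp only [pv_combos, List.mem_flatMap, List.mem_map] at hc
    obtain ⟨i, hi, rest, hrest, rfl⟩ := hc
    have hir := PySem.List.mem_pyRange_one.mp hi
    obtain ⟨hlen, hpw, hbnd⟩ := ih (i + 1) n rest hrest
    refine ⟨by simp [hlen], ?_, ?_⟩
    · exact List.pairwise_cons.mpr ⟨fun j hj => by have := (hbnd j hj).1; omega, hpw⟩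
    · intro j hj
      rcases List.mem_cons.mp hj with rfl | hj
      · exact ⟨hir.1, hir.2⟩
      · have := hbnd j hj; exact ⟨by omega, this.2⟩

-- completeness: every sorted index list inside [lo, n) occurs in its layer
lemma pv_combos_complete : ∀ (c : List Int) (lo n : Int), c.Pairwise (· < ·) →
    (∀ i ∈ c, lo ≤ i ∧ i < n) → c ∈ pv_combos lo n c.length := by
  intro c
  induction c with
  | nil => intro lo n _ _; simp [pv_combos]
  | cons a c ih =>
    intro lo n hp hb
    have hpc := List.pairwise_cons.mp hp
    simp only [List.length_cons, pv_combos, List.mem_flatMap]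
    refine ⟨a, PySem.List.mem_pyRange_one.mpr ⟨(hb a (by simp)).1, (hb a (by simp)).2⟩, ?_⟩
    simp only [List.mem_map]
    refine ⟨c, ih (a + 1) n hpc.2 (fun i hi => ⟨by have := hpc.1 i hi; omega,
      (hb i (by simp [hi])).2⟩), rfl⟩

-- the combos of one layer are pairwise distinct (they are the dict keys)
lemma pv_combos_nodup : ∀ (s : Nat) (lo n : Int), (pv_combos lo n s).Nodup := by
  intro s
  induction s with
  | zero => intro lo n; simp [pv_combos]
  | succ s ih =>
    intro lo n
    rw [pv_combos, List.nodup_flatMap]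
    constructor
    · intro i _
      exact (ih (i + 1) n).map (fun a b h => by simpa using h)
    · have hpd := PySem.List.pairwise_lt_pyRange_one lo n
      refine hpd.imp ?_
      intro i j hij
      intro l hl1 hl2
      rcases List.mem_map.mp hl1 with ⟨r1, _, rfl⟩
      rcases List.mem_map.mp hl2 with ⟨r2, _, h2⟩
      injection h2 with hh _
      omega

-- a layer member with one element filtered out lies in the previous layer
lemma pv_combos_filter {n : Int} {s : Nat} {co : List Int} (hc : co ∈ pv_combos 0 n (s + 1))
    {i : Int} (hi : i ∈ co) : co.filter (fun j => j != i) ∈ pv_combos 0 n s := by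
  obtain ⟨hlen, hp, hb⟩ := pv_combos_mem _ _ _ _ hc
  obtain ⟨k, hk, rfl⟩ := List.mem_iff_getElem.mp hi
  rw [← pv_eraseIdx_eq_filter co hp k hk]
  have hsub : List.Sublist (co.eraseIdx k) co := List.eraseIdx_sublist co k
  have hlen' : (co.eraseIdx k).length = s := by
    rw [List.length_eraseIdx]; simp [hk]; omega
  have := pv_combos_complete (co.eraseIdx k) 0 n (hp.sublist hsub)
    (fun j hj => hb j (hsub.mem hj))
  rwa [hlen'] at this

-- a fold of inserts with fresh distinct keys: lookups read back the inserted value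
lemma pv_getD_foldl_insert {ν : Type} (cs : List (List Int)) (F : List Int → ν)
    (hnd : cs.Nodup) {c : List Int} (hc : c ∈ cs) (dflt : ν) :
    (cs.foldl (fun d c => d.insert c (F c)) PySem.Dict.empty).getD c dflt = F c := by
  have hitems := PySem.Dict.items_foldl_insert_fresh cs (fun c => c) F PySem.Dict.empty
      (by intro a _; simp) (by simpa using hnd)
  have hkeys : (cs.foldl (fun d c => d.insert c (F c)) PySem.Dict.empty).keys.Nodup :=
    PySem.Dict.nodup_keys_foldl_insert cs (fun _ c => F c) PySem.Dict.empty
      PySem.Dict.nodup_keys_empty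
  have hmem : (c, F c) ∈ (cs.foldl (fun d c => d.insert c (F c)) PySem.Dict.empty).items := by
    rw [hitems]
    simp only [List.mem_append, List.mem_map]
    exact Or.inr ⟨c, hc, rfl⟩
  exact PySem.Dict.getD_of_mem_items _ hmem hkeys dflt

-- any-congruence on members
lemma pv_any_congr {α : Type} (l : List α) {p q : α → Bool} (h : ∀ a ∈ l, p a = q a) :
    l.any p = l.any q := by
  induction l with
  | nil => rfl
  | cons a l ih =>
    simp only [List.any_cons, h a (by simp), ih (fun b hb => h b (by simp [hb]))]

-- the heart: one unfolding of A on a selected sub-list, re-indexed over the index list co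
lemma pv_A_step (towns : List (Int × Int)) (gold K : Int) (hK : ¬ K = 1)
    (co : List Int) (hp : co.Pairwise (· < ·)) :
    are_raidable (co.map (fun i => PySem.List.pyGetD towns i (0, 0))) gold K
      = co.any (fun i =>
          are_raidable ((co.filter (fun j => j != i)).map
              (fun i => PySem.List.pyGetD towns i (0, 0))) gold (K - 1)
          && decide ((co.map (fun i =>
                (PySem.List.pyGetD towns i (0, 0)).1 - (PySem.List.pyGetD towns i (0, 0)).2)).sum
              + (PySem.List.pyGetD towns i (0, 0)).2 ≤ gold)) := by
  set g : Int → Int × Int := fun i => PySem.List.pyGetD towns i (0, 0) with hg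
  set L : List (Int × Int) := co.map g with hL
  have hLlen : L.length = co.length := by simp [hL]
  -- the two bodies agree at each position k
  have key : ∀ (k : Nat), (hk : k < co.length) →
      (are_raidable (((PySem.List.enumerate L).filter
            (fun q => q.1 != ((0 : Int) + (k : Int)))).map Prod.snd) gold (K - 1)
        && decide ((L[k]'(by omega)).1 ≤ gold - cost_to_raid (((PySem.List.enumerate L).filter
            (fun q => q.1 != ((0 : Int) + (k : Int)))).map Prod.snd)))
      = (are_raidable ((co.filter (fun j => j != (co[k]'hk))).map g) gold (K - 1)
        && decide ((co.map (fun i => (g i).1 - (g i).2)).sum + (g (co[k]'hk)).2 ≤ gold)) := by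
    intro k hk
    have hoth : (((PySem.List.enumerate L).filter
        (fun q => q.1 != ((0 : Int) + (k : Int)))).map Prod.snd)
        = (co.filter (fun j => j != (co[k]'hk))).map g := by
      rw [pv_enum_filter_erase L 0 k (by omega), hL, List.eraseIdx_map,
        ← pv_eraseIdx_eq_filter co hp k hk]
    rw [hoth]
    have hLk : (L[k]'(by omega)) = g (co[k]'hk) := by simp [hL]
    have hcost : cost_to_raid ((co.filter (fun j => j != (co[k]'hk))).map g)
        = (co.map (fun i => (g i).1 - (g i).2)).sum - ((g (co[k]'hk)).1 - (g (co[k]'hk)).2) := by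
      rw [← pv_eraseIdx_eq_filter co hp k hk]
      unfold cost_to_raid
      rw [List.map_map, List.map_map]
      rw [show (Prod.fst ∘ g) = (fun i => (g i).1) from rfl,
        show (Prod.snd ∘ g) = (fun i => (g i).2) from rfl]
      rw [pv_sum_map_eraseIdx co (fun i => (g i).1) k hk,
        pv_sum_map_eraseIdx co (fun i => (g i).2) k hk, pv_sum_map_sub]
      ring
    rw [hLk, hcost]
    congr 1
    rw [decide_eq_decide]
    omega
  rw [are_raidable]
  rw [if_neg hK]
  rw [Bool.eq_iff_iff]
  simp only [List.any_eq_true, List.mem_attach, true_and, Subtype.exists]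
  constructor
  · rintro ⟨a, ha, hbody⟩
    obtain ⟨k, hk, rfl⟩ := (PySem.List.mem_enumerate_iff L 0 a).mp ha
    have hk' : k < co.length := by omega
    refine ⟨co[k]'hk', co.getElem_mem hk', ?_⟩
    simp only at hbody
    rw [key k hk'] at hbody
    exact hbody
  · rintro ⟨i, hi, hbody⟩
    obtain ⟨k, hk, rfl⟩ := List.mem_iff_getElem.mp hi
    refine ⟨((0 : Int) + (k : Int), L[k]'(by omega)), (PySem.List.mem_enumerate_iff L 0 _).mpr
      ⟨k, by omega, rfl⟩, ?_⟩
    simp only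
    rw [key k hk]
    exact hbody

-- A returns False whenever K ≤ 0 or K ≥ len(towns) + 2
lemma pv_A_false_aux : ∀ (m : Nat) (towns : List (Int × Int)) (gold K : Int),
    towns.length ≤ m → (K ≤ 0 ∨ (towns.length : Int) + 2 ≤ K) →
    are_raidable towns gold K = false := by
  intro m
  induction m with
  | zero =>
    intro towns gold K hl hK
    have ht : towns = [] := List.eq_nil_of_length_eq_zero (by omega)
    subst ht
    rw [are_raidable]
    have h1 : ¬ K = 1 := by
      rcases hK with h | h
      · omega
      · simp only [List.length_nil, Nat.cast_zero] at h; omega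
    rw [if_neg h1]
    simp [PySem.List.enumerate_nil]
  | succ m ih =>
    intro towns gold K hl hK
    rw [are_raidable]
    have h1 : ¬ K = 1 := by
      rcases hK with h | h
      · omega
      · have : (0 : Int) ≤ (towns.length : Int) := by positivity
        omega
    rw [if_neg h1]
    rw [List.any_eq_false]
    intro p _
    have hlt := pv_others_len (PySem.List.enumerate towns) p.1 p.2
    rw [PySem.List.length_enumerate] at hlt
    simp only [List.length_map] at hlt
    have hrec : are_raidable (((PySem.List.enumerate towns).filter
        (fun q => q.1 != p.1.1)).map Prod.snd) gold (K - 1) = false := by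
      apply ih _ gold (K - 1)
      · simp only [List.length_map]; omega
      · rcases hK with h | h
        · left; omega
        · right
          simp only [List.length_map]
          have : ((((PySem.List.enumerate towns).filter (fun q => q.1 != p.1.1)).length : Int))
              ≤ (towns.length : Int) - 1 := by push_cast; omega
          omega
    simp [hrec]

lemma pv_A_nonpos (towns : List (Int × Int)) (gold K : Int) (h : K ≤ 0) :
    are_raidable towns gold K = false :=
  pv_A_false_aux towns.length towns gold K le_rfl (Or.inl h)

lemma pv_A_big (towns : List (Int × Int)) (gold K : Int) (h : (towns.length : Int) + 2 ≤ K) :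
    are_raidable towns gold K = false :=
  pv_A_false_aux towns.length towns gold K le_rfl (Or.inr h)

-- the base layer of the DP agrees with A at level 1
lemma pv_base_correct (towns : List (Int × Int)) (gold : Int) (base : Nat) (hb : 1 ≤ base)
    {c : List Int} (hc : c ∈ pv_combos 0 (towns.length : Int) base) :
    (pv_baseDict towns gold (base : Int)).getD c false
      = are_raidable (c.map (fun i => PySem.List.pyGetD towns i (0, 0))) gold 1 := by
  unfold pv_baseDict
  rw [show ((base : Int)).toNat = base by omega]
  rw [pv_getD_foldl_insert _ _ (pv_combos_nodup _ _ _) hc]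
  obtain ⟨hlen, _, _⟩ := pv_combos_mem _ _ _ _ hc
  obtain ⟨i, rest, rfl⟩ : ∃ i rest, c = i :: rest := by
    cases c with
    | nil => simp at hlen; omega
    | cons i rest => exact ⟨i, rest, rfl⟩
  rw [are_raidable]
  rw [if_pos rfl]
  simp [PySem.List.pyGet?_zero_cons, PySem.List.pyGetD_zero_cons]

-- the layered fold computes A's value for every combo of its layer
lemma pv_layers (towns : List (Int × Int)) (gold : Int) (base : Nat) (hb : 1 ≤ base) :
    ∀ (t : Nat), base + t ≤ towns.length →
    ∀ c ∈ pv_combos 0 (towns.length : Int) (base + t),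
      ((PySem.List.pyRange ((base : Int) + 1) ((base : Int) + (t : Int) + 1)).foldl
          (pv_layerStep towns gold) (pv_baseDict towns gold (base : Int))).getD c false
        = are_raidable (c.map (fun i => PySem.List.pyGetD towns i (0, 0))) gold ((t : Int) + 1) := by
  intro t
  induction t with
  | zero =>
    intro _ c hc
    rw [PySem.List.pyRange_one_eq_nil (by push_cast; omega)]
    rw [List.foldl_nil]
    have := pv_base_correct towns gold base hb (c := c) (by simpa using hc)
    simpa using this
  | succ t ih =>
    intro hle c hc
    have hsplit : PySem.List.pyRange ((base : Int) + 1) ((base : Int) + ((t : Nat) + 1 : Nat) + 1)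
        = PySem.List.pyRange ((base : Int) + 1) ((base : Int) + (t : Int) + 1)
          ++ [(base : Int) + (t : Int) + 1] := by
      rw [show ((base : Int) + ((t : Nat) + 1 : Nat) + 1) = ((base : Int) + (t : Int) + 1) + 1 by
        push_cast; ring]
      exact PySem.List.pyRange_one_succ_right (by push_cast; omega)
    rw [hsplit, List.foldl_append, List.foldl_cons, List.foldl_nil]
    rw [pv_layerStep]
    rw [show ((base : Int) + (t : Int) + 1).toNat = base + t + 1 by omega]
    have hc' : c ∈ pv_combos 0 (towns.length : Int) (base + t + 1) := hc
    rw [pv_getD_foldl_insert _ _ (pv_combos_nodup _ _ _) hc']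
    obtain ⟨hlen, hpw, hbnd⟩ := pv_combos_mem _ _ _ _ hc'
    rw [show (((t : Nat) + 1 : Nat) : Int) + 1 = ((t : Int) + 1) + 1 by push_cast; ring]
    rw [pv_A_step towns gold (((t : Int) + 1) + 1) (by omega) c hpw]
    apply pv_any_congr
    intro i hi
    have hfi := pv_combos_filter hc' hi
    have hcur := ih (by omega) _ hfi
    rw [show ((t : Int) + 1) + 1 - 1 = (t : Int) + 1 by ring]
    rw [hcur]

-- the main case 2 ≤ K ≤ len(towns)
lemma pv_main (towns : List (Int × Int)) (gold K : Int) (h2 : 2 ≤ K)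
    (hn : K ≤ (towns.length : Int)) :
    are_raidable towns gold K = are_raidable_alt towns gold K := by
  unfold are_raidable_alt
  rw [if_neg (by push_cast; omega)]
  rw [if_neg (by omega)]
  show are_raidable towns gold K =
    ((PySem.List.pyRange ((towns.length : Int) - K + 1 + 1) ((towns.length : Int) + 1)).foldl
        (pv_layerStep towns gold) (pv_baseDict towns gold ((towns.length : Int) - K + 1))).getD
      (PySem.List.pyRange 0 (towns.length : Int)) false
  obtain ⟨bN, hbN⟩ : ∃ b : Nat, (b : Int) = (towns.length : Int) - K + 1 :=
    ⟨((towns.length : Int) - K + 1).toNat, by omega⟩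
  obtain ⟨tN, htN⟩ : ∃ t : Nat, (t : Int) = K - 1 := ⟨(K - 1).toNat, by omega⟩
  have hbt : bN + tN = towns.length := by omega
  have hb1 : 1 ≤ bN := by omega
  have hfull : PySem.List.pyRange 0 (towns.length : Int) ∈
      pv_combos 0 (towns.length : Int) (bN + tN) := by
    have := pv_combos_complete (PySem.List.pyRange 0 (towns.length : Int)) 0
      (towns.length : Int) (PySem.List.pairwise_lt_pyRange_one 0 (towns.length : Int))
      (fun i hi => PySem.List.mem_pyRange_one.mp hi)
    rwa [show (PySem.List.pyRange 0 (towns.length : Int)).length = bN + tN by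
      rw [PySem.List.length_pyRange_one]; omega] at this
  have hlay := pv_layers towns gold bN hb1 tN (by omega) _ hfull
  rw [show (towns.length : Int) - K + 1 + 1 = (bN : Int) + 1 by omega,
    show (towns.length : Int) + 1 = (bN : Int) + (tN : Int) + 1 by omega,
    show (towns.length : Int) - K + 1 = (bN : Int) by omega]
  rw [hlay]
  rw [PySem.List.map_pyGetD_pyRange_zero' towns (0, 0)]
  rw [show (tN : Int) + 1 = K by omega]

-- ===== VERDICT (by name: the statement is the Claim_ definition above) =====
theorem are_raidable_spec : Claim_equal_are_raidable := by
  unfold Claim_equal_are_raidable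
  intro towns gold K _ hpre
  unfold Spec_are_raidable
  unfold Pre_are_raidable at hpre
  by_cases h0 : K ≤ 0
  · rw [pv_A_nonpos towns gold K h0]
    unfold are_raidable_alt
    rw [if_pos (Or.inl h0)]
  · by_cases hbig : (towns.length : Int) < K
    · have hK2 : (towns.length : Int) + 2 ≤ K := by omega
      rw [pv_A_big towns gold K hK2]
      unfold are_raidable_alt
      rw [if_pos (Or.inr hbig)]
    · by_cases h1 : K = 1
      · subst h1
        cases towns with
        | nil => simp at hbig
        | cons t ts =>
          rw [are_raidable, if_pos rfl]
          unfold are_raidable_alt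
          have h9 : (1 : Int) ≤ ((t :: ts).length : Int) := by
            exact_mod_cast Nat.one_le_iff_ne_zero.mpr (by simp)
          rw [if_neg (by omega), if_pos rfl]
          simp [PySem.List.pyGet?_zero_cons, PySem.List.pyGetD_zero_cons]
      · exact pv_main towns gold K (by omega) (by omega)
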